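/- GENERATED by farm/mkassembly.py --proved-out — do not edit.
   `Final.assembly` with the 350 leaf units that are PROVED IN THE TREE filled in; the 0 leaves that are not
   are the hypotheses of `Final.assembly_proved`. When the list is empty, this is the end theorem. -/
import Vorbis.Spec.Assembly
import Vorbis.Spec.Worked.abs
import Vorbis.Spec.Worked.add_entry
import Vorbis.Spec.Worked.arena_poison
import Vorbis.Spec.Worked.arena_temp_restore
import Vorbis.Spec.Worked.arena_unpoison
import Vorbis.Spec.Worked.asan_load16_noabort
import Vorbis.Spec.Worked.asan_load1_noabort
import Vorbis.Spec.Worked.asan_load2_noabort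
import Vorbis.Spec.Worked.asan_load4_noabort
import Vorbis.Spec.Worked.asan_load8_noabort
import Vorbis.Spec.Worked.asan_register_globals
import Vorbis.Spec.Worked.asan_store16_noabort
import Vorbis.Spec.Worked.asan_store1_noabort
import Vorbis.Spec.Worked.asan_store2_noabort
import Vorbis.Spec.Worked.asan_store4_noabort
import Vorbis.Spec.Worked.asan_store8_noabort
import Vorbis.Spec.Worked.asan_storeN_noabort
import Vorbis.Spec.Worked.bit_reverse
import Vorbis.Spec.Worked.capture_pattern
import Vorbis.Spec.Worked.codebook_decode
import Vorbis.Spec.Worked.codebook_decode_deinterleave_repeat_1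
import Vorbis.Spec.Worked.codebook_decode_deinterleave_repeat_2a
import Vorbis.Spec.Worked.codebook_decode_deinterleave_repeat_2b
import Vorbis.Spec.Worked.codebook_decode_deinterleave_repeat_2c
import Vorbis.Spec.Worked.codebook_decode_deinterleave_repeat_2d
import Vorbis.Spec.Worked.codebook_decode_deinterleave_repeat_3
import Vorbis.Spec.Worked.codebook_decode_deinterleave_repeat_4
import Vorbis.Spec.Worked.codebook_decode_deinterleave_repeat_5
import Vorbis.Spec.Worked.codebook_decode_deinterleave_repeat_6
import Vorbis.Spec.Worked.codebook_decode_deinterleave_repeat_7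
import Vorbis.Spec.Worked.codebook_decode_scalar_raw_1
import Vorbis.Spec.Worked.codebook_decode_scalar_raw_2
import Vorbis.Spec.Worked.codebook_decode_scalar_raw_3
import Vorbis.Spec.Worked.codebook_decode_scalar_raw_4
import Vorbis.Spec.Worked.codebook_decode_start
import Vorbis.Spec.Worked.codebook_decode_step
import Vorbis.Spec.Worked.compute_accelerated_huffman
import Vorbis.Spec.Worked.compute_bitreverse
import Vorbis.Spec.Worked.compute_codewords_1
import Vorbis.Spec.Worked.compute_codewords_2
import Vorbis.Spec.Worked.compute_codewords_3
import Vorbis.Spec.Worked.compute_codewords_4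
import Vorbis.Spec.Worked.compute_codewords_5
import Vorbis.Spec.Worked.compute_codewords_6
import Vorbis.Spec.Worked.compute_codewords_7
import Vorbis.Spec.Worked.compute_codewords_8
import Vorbis.Spec.Worked.compute_codewords_9
import Vorbis.Spec.Worked.compute_sorted_huffman_1
import Vorbis.Spec.Worked.compute_sorted_huffman_2
import Vorbis.Spec.Worked.compute_sorted_huffman_3
import Vorbis.Spec.Worked.compute_sorted_huffman_4
import Vorbis.Spec.Worked.compute_twiddle_factors
import Vorbis.Spec.Worked.compute_window
import Vorbis.Spec.Worked.copy_frame
import Vorbis.Spec.Worked.cos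
import Vorbis.Spec.Worked.cos_poly
import Vorbis.Spec.Worked.crc32_init
import Vorbis.Spec.Worked.decode_all_1
import Vorbis.Spec.Worked.decode_all_2
import Vorbis.Spec.Worked.decode_all_3
import Vorbis.Spec.Worked.decode_all_4
import Vorbis.Spec.Worked.decode_all_5
import Vorbis.Spec.Worked.decode_all_6
import Vorbis.Spec.Worked.decode_all_7
import Vorbis.Spec.Worked.decode_residue_10
import Vorbis.Spec.Worked.decode_residue_11
import Vorbis.Spec.Worked.decode_residue_1a
import Vorbis.Spec.Worked.decode_residue_1b
import Vorbis.Spec.Worked.decode_residue_1c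
import Vorbis.Spec.Worked.decode_residue_1d
import Vorbis.Spec.Worked.decode_residue_2
import Vorbis.Spec.Worked.decode_residue_3
import Vorbis.Spec.Worked.decode_residue_4a
import Vorbis.Spec.Worked.decode_residue_4b
import Vorbis.Spec.Worked.decode_residue_5
import Vorbis.Spec.Worked.decode_residue_6a
import Vorbis.Spec.Worked.decode_residue_6ba
import Vorbis.Spec.Worked.decode_residue_6bb
import Vorbis.Spec.Worked.decode_residue_7a
import Vorbis.Spec.Worked.decode_residue_7b
import Vorbis.Spec.Worked.decode_residue_7c
import Vorbis.Spec.Worked.decode_residue_8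
import Vorbis.Spec.Worked.decode_residue_9
import Vorbis.Spec.Worked.do_floor
import Vorbis.Spec.Worked.draw_line
import Vorbis.Spec.Worked.error
import Vorbis.Spec.Worked.exp
import Vorbis.Spec.Worked.float32_unpack
import Vorbis.Spec.Worked.floor
import Vorbis.Spec.Worked.flush_packet
import Vorbis.Spec.Worked.free
import Vorbis.Spec.Worked.get32
import Vorbis.Spec.Worked.get32_packet
import Vorbis.Spec.Worked.get8
import Vorbis.Spec.Worked.get8_packet
import Vorbis.Spec.Worked.get8_packet_raw
import Vorbis.Spec.Worked.get_bits
import Vorbis.Spec.Worked.get_bits_24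
import Vorbis.Spec.Worked.get_window
import Vorbis.Spec.Worked.getn
import Vorbis.Spec.Worked.ilog
import Vorbis.Spec.Worked.imdct_step3_inner_r_loop_1
import Vorbis.Spec.Worked.imdct_step3_inner_r_loop_2
import Vorbis.Spec.Worked.imdct_step3_inner_r_loop_3
import Vorbis.Spec.Worked.imdct_step3_inner_r_loop_4
import Vorbis.Spec.Worked.imdct_step3_inner_s_loop_1
import Vorbis.Spec.Worked.imdct_step3_inner_s_loop_2
import Vorbis.Spec.Worked.imdct_step3_inner_s_loop_3
import Vorbis.Spec.Worked.imdct_step3_inner_s_loop_ld654_1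
import Vorbis.Spec.Worked.imdct_step3_inner_s_loop_ld654_2
import Vorbis.Spec.Worked.imdct_step3_inner_s_loop_ld654_3
import Vorbis.Spec.Worked.imdct_step3_iter0_loop_1
import Vorbis.Spec.Worked.imdct_step3_iter0_loop_2
import Vorbis.Spec.Worked.imdct_step3_iter0_loop_3
import Vorbis.Spec.Worked.imdct_step3_iter0_loop_4
import Vorbis.Spec.Worked.include_in_sort
import Vorbis.Spec.Worked.init_blocksize
import Vorbis.Spec.Worked.inverse_mdct_1
import Vorbis.Spec.Worked.inverse_mdct_10
import Vorbis.Spec.Worked.inverse_mdct_11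
import Vorbis.Spec.Worked.inverse_mdct_12
import Vorbis.Spec.Worked.inverse_mdct_2
import Vorbis.Spec.Worked.inverse_mdct_3
import Vorbis.Spec.Worked.inverse_mdct_4
import Vorbis.Spec.Worked.inverse_mdct_5
import Vorbis.Spec.Worked.inverse_mdct_6
import Vorbis.Spec.Worked.inverse_mdct_7a
import Vorbis.Spec.Worked.inverse_mdct_7b
import Vorbis.Spec.Worked.inverse_mdct_8
import Vorbis.Spec.Worked.inverse_mdct_9
import Vorbis.Spec.Worked.iter_54
import Vorbis.Spec.Worked.ldexp
import Vorbis.Spec.Worked.log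
import Vorbis.Spec.Worked.lookup1_values
import Vorbis.Spec.Worked.make_block_array
import Vorbis.Spec.Worked.malloc
import Vorbis.Spec.Worked.maybe_start_packet
import Vorbis.Spec.Worked.memcmp
import Vorbis.Spec.Worked.memcpy
import Vorbis.Spec.Worked.memset
import Vorbis.Spec.Worked.neighbors
import Vorbis.Spec.Worked.next_segment
import Vorbis.Spec.Worked.point_compare
import Vorbis.Spec.Worked.pow
import Vorbis.Spec.Worked.pow_int
import Vorbis.Spec.Worked.predict_point
import Vorbis.Spec.Worked.prep_huffman
import Vorbis.Spec.Worked.put_header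
import Vorbis.Spec.Worked.qsort
import Vorbis.Spec.Worked.range_bad
import Vorbis.Spec.Worked.residue_decode
import Vorbis.Spec.Worked.run_ctors
import Vorbis.Spec.Worked.setup_free
import Vorbis.Spec.Worked.setup_malloc
import Vorbis.Spec.Worked.setup_temp_free
import Vorbis.Spec.Worked.setup_temp_malloc
import Vorbis.Spec.Worked.sift_down
import Vorbis.Spec.Worked.sin
import Vorbis.Spec.Worked.sin_poly
import Vorbis.Spec.Worked.sincos_quadrant
import Vorbis.Spec.Worked.skip
import Vorbis.Spec.Worked.square
import Vorbis.Spec.Worked.start_decoder_1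
import Vorbis.Spec.Worked.start_decoder_2a
import Vorbis.Spec.Worked.start_decoder_2b
import Vorbis.Spec.Worked.start_decoder_2c
import Vorbis.Spec.Worked.start_decoder_2d
import Vorbis.Spec.Worked.start_decoder_3
import Vorbis.Spec.Worked.start_decoder_4
import Vorbis.Spec.Worked.start_decoder_5
import Vorbis.Spec.Worked.start_decoder_6
import Vorbis.Spec.Worked.start_decoder_7
import Vorbis.Spec.Worked.start_decoder_8
import Vorbis.Spec.Worked.start_decoder_9a
import Vorbis.Spec.Worked.start_decoder_9b
import Vorbis.Spec.Worked.start_decoder_9c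
import Vorbis.Spec.Worked.start_decoder_9d
import Vorbis.Spec.Worked.start_decoder_9e
import Vorbis.Spec.Worked.start_decoder_9f
import Vorbis.Spec.Worked.start_decoder_C1
import Vorbis.Spec.Worked.start_decoder_C10
import Vorbis.Spec.Worked.start_decoder_C11a
import Vorbis.Spec.Worked.start_decoder_C11b
import Vorbis.Spec.Worked.start_decoder_C11c
import Vorbis.Spec.Worked.start_decoder_C11d
import Vorbis.Spec.Worked.start_decoder_C11e
import Vorbis.Spec.Worked.start_decoder_C11f
import Vorbis.Spec.Worked.start_decoder_C11g
import Vorbis.Spec.Worked.start_decoder_C12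
import Vorbis.Spec.Worked.start_decoder_C13a
import Vorbis.Spec.Worked.start_decoder_C13b
import Vorbis.Spec.Worked.start_decoder_C13c
import Vorbis.Spec.Worked.start_decoder_C13d
import Vorbis.Spec.Worked.start_decoder_C14a
import Vorbis.Spec.Worked.start_decoder_C14b
import Vorbis.Spec.Worked.start_decoder_C14c
import Vorbis.Spec.Worked.start_decoder_C15
import Vorbis.Spec.Worked.start_decoder_C16
import Vorbis.Spec.Worked.start_decoder_C2a
import Vorbis.Spec.Worked.start_decoder_C2b
import Vorbis.Spec.Worked.start_decoder_C2c
import Vorbis.Spec.Worked.start_decoder_C2d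
import Vorbis.Spec.Worked.start_decoder_C3a
import Vorbis.Spec.Worked.start_decoder_C3b
import Vorbis.Spec.Worked.start_decoder_C3c
import Vorbis.Spec.Worked.start_decoder_C4a
import Vorbis.Spec.Worked.start_decoder_C4b
import Vorbis.Spec.Worked.start_decoder_C4c
import Vorbis.Spec.Worked.start_decoder_C4d
import Vorbis.Spec.Worked.start_decoder_C5a
import Vorbis.Spec.Worked.start_decoder_C5b
import Vorbis.Spec.Worked.start_decoder_C5c
import Vorbis.Spec.Worked.start_decoder_C5d
import Vorbis.Spec.Worked.start_decoder_C5e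
import Vorbis.Spec.Worked.start_decoder_C6a
import Vorbis.Spec.Worked.start_decoder_C6b
import Vorbis.Spec.Worked.start_decoder_C6c
import Vorbis.Spec.Worked.start_decoder_C6d
import Vorbis.Spec.Worked.start_decoder_C6e
import Vorbis.Spec.Worked.start_decoder_C7a
import Vorbis.Spec.Worked.start_decoder_C7b
import Vorbis.Spec.Worked.start_decoder_C8a
import Vorbis.Spec.Worked.start_decoder_C8b
import Vorbis.Spec.Worked.start_decoder_C8c
import Vorbis.Spec.Worked.start_decoder_C8d
import Vorbis.Spec.Worked.start_decoder_C8e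
import Vorbis.Spec.Worked.start_decoder_C8f
import Vorbis.Spec.Worked.start_decoder_C9a
import Vorbis.Spec.Worked.start_decoder_C9b
import Vorbis.Spec.Worked.start_decoder_C9c
import Vorbis.Spec.Worked.start_decoder_C9d
import Vorbis.Spec.Worked.start_decoder_ERR
import Vorbis.Spec.Worked.start_decoder_F1
import Vorbis.Spec.Worked.start_decoder_F2a
import Vorbis.Spec.Worked.start_decoder_F2b
import Vorbis.Spec.Worked.start_decoder_F2c
import Vorbis.Spec.Worked.start_decoder_F2d
import Vorbis.Spec.Worked.start_decoder_F3
import Vorbis.Spec.Worked.start_decoder_F4a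
import Vorbis.Spec.Worked.start_decoder_F4b
import Vorbis.Spec.Worked.start_decoder_F4c
import Vorbis.Spec.Worked.start_decoder_F4d
import Vorbis.Spec.Worked.start_decoder_F4e
import Vorbis.Spec.Worked.start_decoder_F5a
import Vorbis.Spec.Worked.start_decoder_F5b
import Vorbis.Spec.Worked.start_decoder_F5c
import Vorbis.Spec.Worked.start_decoder_F5d
import Vorbis.Spec.Worked.start_decoder_F5e
import Vorbis.Spec.Worked.start_decoder_F5f
import Vorbis.Spec.Worked.start_decoder_F6a
import Vorbis.Spec.Worked.start_decoder_F6b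
import Vorbis.Spec.Worked.start_decoder_F6c
import Vorbis.Spec.Worked.start_decoder_F6d
import Vorbis.Spec.Worked.start_decoder_F7
import Vorbis.Spec.Worked.start_decoder_R10
import Vorbis.Spec.Worked.start_decoder_R11
import Vorbis.Spec.Worked.start_decoder_R12a
import Vorbis.Spec.Worked.start_decoder_R12b
import Vorbis.Spec.Worked.start_decoder_R12c
import Vorbis.Spec.Worked.start_decoder_R12d
import Vorbis.Spec.Worked.start_decoder_R13
import Vorbis.Spec.Worked.start_decoder_R14
import Vorbis.Spec.Worked.start_decoder_R15
import Vorbis.Spec.Worked.start_decoder_R16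
import Vorbis.Spec.Worked.start_decoder_R17
import Vorbis.Spec.Worked.start_decoder_R18
import Vorbis.Spec.Worked.start_decoder_R19
import Vorbis.Spec.Worked.start_decoder_R1a
import Vorbis.Spec.Worked.start_decoder_R1b
import Vorbis.Spec.Worked.start_decoder_R1c
import Vorbis.Spec.Worked.start_decoder_R1d
import Vorbis.Spec.Worked.start_decoder_R2
import Vorbis.Spec.Worked.start_decoder_R3
import Vorbis.Spec.Worked.start_decoder_R4
import Vorbis.Spec.Worked.start_decoder_R5
import Vorbis.Spec.Worked.start_decoder_R6
import Vorbis.Spec.Worked.start_decoder_R7a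
import Vorbis.Spec.Worked.start_decoder_R7b
import Vorbis.Spec.Worked.start_decoder_R7c
import Vorbis.Spec.Worked.start_decoder_R8
import Vorbis.Spec.Worked.start_decoder_R9
import Vorbis.Spec.Worked.start_packet
import Vorbis.Spec.Worked.start_page
import Vorbis.Spec.Worked.start_page_no_capturepattern
import Vorbis.Spec.Worked.start_vorbis
import Vorbis.Spec.Worked.stb_vorbis_close
import Vorbis.Spec.Worked.stb_vorbis_get_error
import Vorbis.Spec.Worked.stb_vorbis_get_file_offset
import Vorbis.Spec.Worked.stb_vorbis_get_frame_float_1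
import Vorbis.Spec.Worked.stb_vorbis_get_frame_float_2
import Vorbis.Spec.Worked.stb_vorbis_get_frame_float_3
import Vorbis.Spec.Worked.stb_vorbis_get_frame_float_4
import Vorbis.Spec.Worked.stb_vorbis_get_frame_float_5
import Vorbis.Spec.Worked.stb_vorbis_get_frame_float_6
import Vorbis.Spec.Worked.stb_vorbis_open_memory
import Vorbis.Spec.Worked.sub_I_65535_1
import Vorbis.Spec.Worked.swap_bytes
import Vorbis.Spec.Worked.two_to
import Vorbis.Spec.Worked.uint32_compare
import Vorbis.Spec.Worked.vorbis_alloc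
import Vorbis.Spec.Worked.vorbis_decode_initial_1
import Vorbis.Spec.Worked.vorbis_decode_initial_2
import Vorbis.Spec.Worked.vorbis_decode_initial_3
import Vorbis.Spec.Worked.vorbis_decode_initial_4
import Vorbis.Spec.Worked.vorbis_decode_initial_5
import Vorbis.Spec.Worked.vorbis_decode_initial_6
import Vorbis.Spec.Worked.vorbis_decode_initial_7
import Vorbis.Spec.Worked.vorbis_decode_initial_8
import Vorbis.Spec.Worked.vorbis_decode_initial_9
import Vorbis.Spec.Worked.vorbis_decode_packet
import Vorbis.Spec.Worked.vorbis_decode_packet_rest_10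
import Vorbis.Spec.Worked.vorbis_decode_packet_rest_11
import Vorbis.Spec.Worked.vorbis_decode_packet_rest_12
import Vorbis.Spec.Worked.vorbis_decode_packet_rest_13
import Vorbis.Spec.Worked.vorbis_decode_packet_rest_14
import Vorbis.Spec.Worked.vorbis_decode_packet_rest_15
import Vorbis.Spec.Worked.vorbis_decode_packet_rest_16
import Vorbis.Spec.Worked.vorbis_decode_packet_rest_1a
import Vorbis.Spec.Worked.vorbis_decode_packet_rest_1b
import Vorbis.Spec.Worked.vorbis_decode_packet_rest_2a
import Vorbis.Spec.Worked.vorbis_decode_packet_rest_2b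
import Vorbis.Spec.Worked.vorbis_decode_packet_rest_2c
import Vorbis.Spec.Worked.vorbis_decode_packet_rest_2d
import Vorbis.Spec.Worked.vorbis_decode_packet_rest_3a
import Vorbis.Spec.Worked.vorbis_decode_packet_rest_3b
import Vorbis.Spec.Worked.vorbis_decode_packet_rest_3c
import Vorbis.Spec.Worked.vorbis_decode_packet_rest_4a
import Vorbis.Spec.Worked.vorbis_decode_packet_rest_4b
import Vorbis.Spec.Worked.vorbis_decode_packet_rest_4c
import Vorbis.Spec.Worked.vorbis_decode_packet_rest_4d
import Vorbis.Spec.Worked.vorbis_decode_packet_rest_4e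
import Vorbis.Spec.Worked.vorbis_decode_packet_rest_5a
import Vorbis.Spec.Worked.vorbis_decode_packet_rest_5b
import Vorbis.Spec.Worked.vorbis_decode_packet_rest_5c
import Vorbis.Spec.Worked.vorbis_decode_packet_rest_6
import Vorbis.Spec.Worked.vorbis_decode_packet_rest_7
import Vorbis.Spec.Worked.vorbis_decode_packet_rest_8
import Vorbis.Spec.Worked.vorbis_decode_packet_rest_9
import Vorbis.Spec.Worked.vorbis_deinit_1
import Vorbis.Spec.Worked.vorbis_deinit_2
import Vorbis.Spec.Worked.vorbis_deinit_3
import Vorbis.Spec.Worked.vorbis_deinit_4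
import Vorbis.Spec.Worked.vorbis_finish_frame_1
import Vorbis.Spec.Worked.vorbis_finish_frame_2
import Vorbis.Spec.Worked.vorbis_finish_frame_3
import Vorbis.Spec.Worked.vorbis_finish_frame_4
import Vorbis.Spec.Worked.vorbis_finish_frame_5
import Vorbis.Spec.Worked.vorbis_init
import Vorbis.Spec.Worked.vorbis_pump_first_frame
import Vorbis.Spec.Worked.vorbis_validate
namespace Vorbis.Spec
open X86 X86.User Asan

/-- **The end theorem for the image of the theorems, from the leaf units that are NOT YET PROVED in the tree** (one hypothesis
each; the proved ones are filled in with their theorems). -/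
theorem Final.assembly_proved
    : Vorbis.VorbisStaysInCode (Vorbis.symbols.image Vorbis.imageV5) :=
  Final.assembly
    { h_asan_register_globals := Vorbis.Spec.Worked.asan_register_globals_ok
      h_sub_I_65535_1 := Vorbis.Spec.Worked.sub_I_65535_1_ok
      h_run_ctors := Vorbis.Spec.Worked.run_ctors_ok
      h_asan_load4_noabort := Vorbis.Spec.Worked.asan_load4_noabort_ok
      h_asan_store4_noabort := Vorbis.Spec.Worked.asan_store4_noabort_ok
      h_asan_load8_noabort := Vorbis.Spec.Worked.asan_load8_noabort_ok
      h_copy_frame := Vorbis.Spec.Worked.copy_frame_ok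
      h_put_header := Vorbis.Spec.Worked.put_header_ok
      h_free := Vorbis.Spec.Worked.free_ok
      h_setup_free := Vorbis.Spec.Worked.setup_free_ok
      h_asan_load1_noabort := Vorbis.Spec.Worked.asan_load1_noabort_ok
      h_vorbis_deinit_1 := Vorbis.Spec.Worked.vorbis_deinit_1_ok
      h_vorbis_deinit_2 := Vorbis.Spec.Worked.vorbis_deinit_2_ok
      h_vorbis_deinit_3 := Vorbis.Spec.Worked.vorbis_deinit_3_ok
      h_vorbis_deinit_4 := Vorbis.Spec.Worked.vorbis_deinit_4_ok
      h_stb_vorbis_close := Vorbis.Spec.Worked.stb_vorbis_close_ok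
      h_stb_vorbis_get_error := Vorbis.Spec.Worked.stb_vorbis_get_error_ok
      h_asan_store8_noabort := Vorbis.Spec.Worked.asan_store8_noabort_ok
      h_get_window := Vorbis.Spec.Worked.get_window_ok
      h_vorbis_finish_frame_1 := Vorbis.Spec.Worked.vorbis_finish_frame_1_ok
      h_vorbis_finish_frame_2 := Vorbis.Spec.Worked.vorbis_finish_frame_2_ok
      h_vorbis_finish_frame_3 := Vorbis.Spec.Worked.vorbis_finish_frame_3_ok
      h_vorbis_finish_frame_4 := Vorbis.Spec.Worked.vorbis_finish_frame_4_ok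
      h_vorbis_finish_frame_5 := Vorbis.Spec.Worked.vorbis_finish_frame_5_ok
      h_asan_store1_noabort := Vorbis.Spec.Worked.asan_store1_noabort_ok
      h_asan_load2_noabort := Vorbis.Spec.Worked.asan_load2_noabort_ok
      h_asan_store2_noabort := Vorbis.Spec.Worked.asan_store2_noabort_ok
      h_memcpy := Vorbis.Spec.Worked.memcpy_ok
      h_memset := Vorbis.Spec.Worked.memset_ok
      h_error := Vorbis.Spec.Worked.error_ok
      h_ilog := Vorbis.Spec.Worked.ilog_ok
      h_abs := Vorbis.Spec.Worked.abs_ok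
      h_predict_point := Vorbis.Spec.Worked.predict_point_ok
      h_draw_line := Vorbis.Spec.Worked.draw_line_ok
      h_do_floor := Vorbis.Spec.Worked.do_floor_ok
      h_imdct_step3_iter0_loop_1 := Vorbis.Spec.Worked.imdct_step3_iter0_loop_1_ok
      h_imdct_step3_iter0_loop_2 := Vorbis.Spec.Worked.imdct_step3_iter0_loop_2_ok
      h_imdct_step3_iter0_loop_3 := Vorbis.Spec.Worked.imdct_step3_iter0_loop_3_ok
      h_imdct_step3_iter0_loop_4 := Vorbis.Spec.Worked.imdct_step3_iter0_loop_4_ok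
      h_imdct_step3_inner_r_loop_1 := Vorbis.Spec.Worked.imdct_step3_inner_r_loop_1_ok
      h_imdct_step3_inner_r_loop_2 := Vorbis.Spec.Worked.imdct_step3_inner_r_loop_2_ok
      h_imdct_step3_inner_r_loop_3 := Vorbis.Spec.Worked.imdct_step3_inner_r_loop_3_ok
      h_imdct_step3_inner_r_loop_4 := Vorbis.Spec.Worked.imdct_step3_inner_r_loop_4_ok
      h_imdct_step3_inner_s_loop_1 := Vorbis.Spec.Worked.imdct_step3_inner_s_loop_1_ok
      h_imdct_step3_inner_s_loop_2 := Vorbis.Spec.Worked.imdct_step3_inner_s_loop_2_ok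
      h_imdct_step3_inner_s_loop_3 := Vorbis.Spec.Worked.imdct_step3_inner_s_loop_3_ok
      h_iter_54 := Vorbis.Spec.Worked.iter_54_ok
      h_imdct_step3_inner_s_loop_ld654_1 := Vorbis.Spec.Worked.imdct_step3_inner_s_loop_ld654_1_ok
      h_imdct_step3_inner_s_loop_ld654_2 := Vorbis.Spec.Worked.imdct_step3_inner_s_loop_ld654_2_ok
      h_imdct_step3_inner_s_loop_ld654_3 := Vorbis.Spec.Worked.imdct_step3_inner_s_loop_ld654_3_ok
      h_arena_unpoison := Vorbis.Spec.Worked.arena_unpoison_ok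
      h_malloc := Vorbis.Spec.Worked.malloc_ok
      h_setup_temp_malloc := Vorbis.Spec.Worked.setup_temp_malloc_ok
      h_arena_poison := Vorbis.Spec.Worked.arena_poison_ok
      h_arena_temp_restore := Vorbis.Spec.Worked.arena_temp_restore_ok
      h_inverse_mdct_1 := Vorbis.Spec.Worked.inverse_mdct_1_ok
      h_inverse_mdct_2 := Vorbis.Spec.Worked.inverse_mdct_2_ok
      h_inverse_mdct_3 := Vorbis.Spec.Worked.inverse_mdct_3_ok
      h_inverse_mdct_4 := Vorbis.Spec.Worked.inverse_mdct_4_ok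
      h_inverse_mdct_5 := Vorbis.Spec.Worked.inverse_mdct_5_ok
      h_inverse_mdct_6 := Vorbis.Spec.Worked.inverse_mdct_6_ok
      h_inverse_mdct_7a := Vorbis.Spec.Worked.inverse_mdct_7a_ok
      h_inverse_mdct_7b := Vorbis.Spec.Worked.inverse_mdct_7b_ok
      h_inverse_mdct_8 := Vorbis.Spec.Worked.inverse_mdct_8_ok
      h_inverse_mdct_9 := Vorbis.Spec.Worked.inverse_mdct_9_ok
      h_inverse_mdct_10 := Vorbis.Spec.Worked.inverse_mdct_10_ok
      h_inverse_mdct_11 := Vorbis.Spec.Worked.inverse_mdct_11_ok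
      h_inverse_mdct_12 := Vorbis.Spec.Worked.inverse_mdct_12_ok
      h_get8 := Vorbis.Spec.Worked.get8_ok
      h_capture_pattern := Vorbis.Spec.Worked.capture_pattern_ok
      h_get32 := Vorbis.Spec.Worked.get32_ok
      h_getn := Vorbis.Spec.Worked.getn_ok
      h_stb_vorbis_get_file_offset := Vorbis.Spec.Worked.stb_vorbis_get_file_offset_ok
      h_start_page_no_capturepattern := Vorbis.Spec.Worked.start_page_no_capturepattern_ok
      h_start_page := Vorbis.Spec.Worked.start_page_ok
      h_next_segment := Vorbis.Spec.Worked.next_segment_ok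
      h_get8_packet_raw := Vorbis.Spec.Worked.get8_packet_raw_ok
      h_get_bits_24 := Vorbis.Spec.Worked.get_bits_24_ok
      h_get_bits := Vorbis.Spec.Worked.get_bits_ok
      h_prep_huffman := Vorbis.Spec.Worked.prep_huffman_ok
      h_bit_reverse := Vorbis.Spec.Worked.bit_reverse_ok
      h_codebook_decode_scalar_raw_1 := Vorbis.Spec.Worked.codebook_decode_scalar_raw_1_ok
      h_codebook_decode_scalar_raw_2 := Vorbis.Spec.Worked.codebook_decode_scalar_raw_2_ok
      h_codebook_decode_scalar_raw_3 := Vorbis.Spec.Worked.codebook_decode_scalar_raw_3_ok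
      h_codebook_decode_scalar_raw_4 := Vorbis.Spec.Worked.codebook_decode_scalar_raw_4_ok
      h_make_block_array := Vorbis.Spec.Worked.make_block_array_ok
      h_codebook_decode_deinterleave_repeat_1 := Vorbis.Spec.Worked.codebook_decode_deinterleave_repeat_1_ok
      h_codebook_decode_deinterleave_repeat_2a := Vorbis.Spec.Worked.codebook_decode_deinterleave_repeat_2a_ok
      h_codebook_decode_deinterleave_repeat_2b := Vorbis.Spec.Worked.codebook_decode_deinterleave_repeat_2b_ok
      h_codebook_decode_deinterleave_repeat_2c := Vorbis.Spec.Worked.codebook_decode_deinterleave_repeat_2c_ok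
      h_codebook_decode_deinterleave_repeat_2d := Vorbis.Spec.Worked.codebook_decode_deinterleave_repeat_2d_ok
      h_codebook_decode_deinterleave_repeat_3 := Vorbis.Spec.Worked.codebook_decode_deinterleave_repeat_3_ok
      h_codebook_decode_deinterleave_repeat_4 := Vorbis.Spec.Worked.codebook_decode_deinterleave_repeat_4_ok
      h_codebook_decode_deinterleave_repeat_5 := Vorbis.Spec.Worked.codebook_decode_deinterleave_repeat_5_ok
      h_codebook_decode_deinterleave_repeat_6 := Vorbis.Spec.Worked.codebook_decode_deinterleave_repeat_6_ok
      h_codebook_decode_deinterleave_repeat_7 := Vorbis.Spec.Worked.codebook_decode_deinterleave_repeat_7_ok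
      h_codebook_decode_start := Vorbis.Spec.Worked.codebook_decode_start_ok
      h_codebook_decode_step := Vorbis.Spec.Worked.codebook_decode_step_ok
      h_codebook_decode := Vorbis.Spec.Worked.codebook_decode_ok
      h_residue_decode := Vorbis.Spec.Worked.residue_decode_ok
      h_decode_residue_1a := Vorbis.Spec.Worked.decode_residue_1a_ok
      h_decode_residue_1b := Vorbis.Spec.Worked.decode_residue_1b_ok
      h_decode_residue_1c := Vorbis.Spec.Worked.decode_residue_1c_ok
      h_decode_residue_1d := Vorbis.Spec.Worked.decode_residue_1d_ok
      h_decode_residue_2 := Vorbis.Spec.Worked.decode_residue_2_ok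
      h_decode_residue_3 := Vorbis.Spec.Worked.decode_residue_3_ok
      h_decode_residue_4a := Vorbis.Spec.Worked.decode_residue_4a_ok
      h_decode_residue_4b := Vorbis.Spec.Worked.decode_residue_4b_ok
      h_decode_residue_5 := Vorbis.Spec.Worked.decode_residue_5_ok
      h_decode_residue_6a := Vorbis.Spec.Worked.decode_residue_6a_ok
      h_decode_residue_6ba := Vorbis.Spec.Worked.decode_residue_6ba_ok
      h_decode_residue_6bb := Vorbis.Spec.Worked.decode_residue_6bb_ok
      h_decode_residue_7a := Vorbis.Spec.Worked.decode_residue_7a_ok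
      h_decode_residue_7b := Vorbis.Spec.Worked.decode_residue_7b_ok
      h_decode_residue_7c := Vorbis.Spec.Worked.decode_residue_7c_ok
      h_decode_residue_8 := Vorbis.Spec.Worked.decode_residue_8_ok
      h_decode_residue_9 := Vorbis.Spec.Worked.decode_residue_9_ok
      h_decode_residue_10 := Vorbis.Spec.Worked.decode_residue_10_ok
      h_decode_residue_11 := Vorbis.Spec.Worked.decode_residue_11_ok
      h_flush_packet := Vorbis.Spec.Worked.flush_packet_ok
      h_vorbis_decode_packet_rest_1a := Vorbis.Spec.Worked.vorbis_decode_packet_rest_1a_ok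
      h_vorbis_decode_packet_rest_1b := Vorbis.Spec.Worked.vorbis_decode_packet_rest_1b_ok
      h_vorbis_decode_packet_rest_2a := Vorbis.Spec.Worked.vorbis_decode_packet_rest_2a_ok
      h_vorbis_decode_packet_rest_2b := Vorbis.Spec.Worked.vorbis_decode_packet_rest_2b_ok
      h_vorbis_decode_packet_rest_2c := Vorbis.Spec.Worked.vorbis_decode_packet_rest_2c_ok
      h_vorbis_decode_packet_rest_2d := Vorbis.Spec.Worked.vorbis_decode_packet_rest_2d_ok
      h_vorbis_decode_packet_rest_3a := Vorbis.Spec.Worked.vorbis_decode_packet_rest_3a_ok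
      h_vorbis_decode_packet_rest_3b := Vorbis.Spec.Worked.vorbis_decode_packet_rest_3b_ok
      h_vorbis_decode_packet_rest_3c := Vorbis.Spec.Worked.vorbis_decode_packet_rest_3c_ok
      h_vorbis_decode_packet_rest_4a := Vorbis.Spec.Worked.vorbis_decode_packet_rest_4a_ok
      h_vorbis_decode_packet_rest_4b := Vorbis.Spec.Worked.vorbis_decode_packet_rest_4b_ok
      h_vorbis_decode_packet_rest_4c := Vorbis.Spec.Worked.vorbis_decode_packet_rest_4c_ok
      h_vorbis_decode_packet_rest_4d := Vorbis.Spec.Worked.vorbis_decode_packet_rest_4d_ok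
      h_vorbis_decode_packet_rest_4e := Vorbis.Spec.Worked.vorbis_decode_packet_rest_4e_ok
      h_vorbis_decode_packet_rest_5a := Vorbis.Spec.Worked.vorbis_decode_packet_rest_5a_ok
      h_vorbis_decode_packet_rest_5b := Vorbis.Spec.Worked.vorbis_decode_packet_rest_5b_ok
      h_vorbis_decode_packet_rest_5c := Vorbis.Spec.Worked.vorbis_decode_packet_rest_5c_ok
      h_vorbis_decode_packet_rest_6 := Vorbis.Spec.Worked.vorbis_decode_packet_rest_6_ok
      h_vorbis_decode_packet_rest_7 := Vorbis.Spec.Worked.vorbis_decode_packet_rest_7_ok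
      h_vorbis_decode_packet_rest_8 := Vorbis.Spec.Worked.vorbis_decode_packet_rest_8_ok
      h_vorbis_decode_packet_rest_9 := Vorbis.Spec.Worked.vorbis_decode_packet_rest_9_ok
      h_vorbis_decode_packet_rest_10 := Vorbis.Spec.Worked.vorbis_decode_packet_rest_10_ok
      h_vorbis_decode_packet_rest_11 := Vorbis.Spec.Worked.vorbis_decode_packet_rest_11_ok
      h_vorbis_decode_packet_rest_12 := Vorbis.Spec.Worked.vorbis_decode_packet_rest_12_ok
      h_vorbis_decode_packet_rest_13 := Vorbis.Spec.Worked.vorbis_decode_packet_rest_13_ok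
      h_vorbis_decode_packet_rest_14 := Vorbis.Spec.Worked.vorbis_decode_packet_rest_14_ok
      h_vorbis_decode_packet_rest_15 := Vorbis.Spec.Worked.vorbis_decode_packet_rest_15_ok
      h_vorbis_decode_packet_rest_16 := Vorbis.Spec.Worked.vorbis_decode_packet_rest_16_ok
      h_get8_packet := Vorbis.Spec.Worked.get8_packet_ok
      h_start_packet := Vorbis.Spec.Worked.start_packet_ok
      h_maybe_start_packet := Vorbis.Spec.Worked.maybe_start_packet_ok
      h_vorbis_decode_initial_1 := Vorbis.Spec.Worked.vorbis_decode_initial_1_ok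
      h_vorbis_decode_initial_2 := Vorbis.Spec.Worked.vorbis_decode_initial_2_ok
      h_vorbis_decode_initial_3 := Vorbis.Spec.Worked.vorbis_decode_initial_3_ok
      h_vorbis_decode_initial_4 := Vorbis.Spec.Worked.vorbis_decode_initial_4_ok
      h_vorbis_decode_initial_5 := Vorbis.Spec.Worked.vorbis_decode_initial_5_ok
      h_vorbis_decode_initial_6 := Vorbis.Spec.Worked.vorbis_decode_initial_6_ok
      h_vorbis_decode_initial_7 := Vorbis.Spec.Worked.vorbis_decode_initial_7_ok
      h_vorbis_decode_initial_8 := Vorbis.Spec.Worked.vorbis_decode_initial_8_ok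
      h_vorbis_decode_initial_9 := Vorbis.Spec.Worked.vorbis_decode_initial_9_ok
      h_vorbis_decode_packet := Vorbis.Spec.Worked.vorbis_decode_packet_ok
      h_stb_vorbis_get_frame_float_1 := Vorbis.Spec.Worked.stb_vorbis_get_frame_float_1_ok
      h_stb_vorbis_get_frame_float_2 := Vorbis.Spec.Worked.stb_vorbis_get_frame_float_2_ok
      h_stb_vorbis_get_frame_float_3 := Vorbis.Spec.Worked.stb_vorbis_get_frame_float_3_ok
      h_stb_vorbis_get_frame_float_4 := Vorbis.Spec.Worked.stb_vorbis_get_frame_float_4_ok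
      h_stb_vorbis_get_frame_float_5 := Vorbis.Spec.Worked.stb_vorbis_get_frame_float_5_ok
      h_stb_vorbis_get_frame_float_6 := Vorbis.Spec.Worked.stb_vorbis_get_frame_float_6_ok
      h_range_bad := Vorbis.Spec.Worked.range_bad_ok
      h_asan_storeN_noabort := Vorbis.Spec.Worked.asan_storeN_noabort_ok
      h_asan_load16_noabort := Vorbis.Spec.Worked.asan_load16_noabort_ok
      h_asan_store16_noabort := Vorbis.Spec.Worked.asan_store16_noabort_ok
      h_vorbis_init := Vorbis.Spec.Worked.vorbis_init_ok
      h_setup_malloc := Vorbis.Spec.Worked.setup_malloc_ok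
      h_vorbis_alloc := Vorbis.Spec.Worked.vorbis_alloc_ok
      h_vorbis_pump_first_frame := Vorbis.Spec.Worked.vorbis_pump_first_frame_ok
      h_swap_bytes := Vorbis.Spec.Worked.swap_bytes_ok
      h_uint32_compare := Vorbis.Spec.Worked.uint32_compare_ok
      h_point_compare := Vorbis.Spec.Worked.point_compare_ok
      h_sift_down := Vorbis.Spec.Worked.sift_down_ok
      h_qsort := Vorbis.Spec.Worked.qsort_ok
      h_crc32_init := Vorbis.Spec.Worked.crc32_init_ok
      h_compute_accelerated_huffman := Vorbis.Spec.Worked.compute_accelerated_huffman_ok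
      h_neighbors := Vorbis.Spec.Worked.neighbors_ok
      h_skip := Vorbis.Spec.Worked.skip_ok
      h_add_entry := Vorbis.Spec.Worked.add_entry_ok
      h_compute_codewords_1 := Vorbis.Spec.Worked.compute_codewords_1_ok
      h_compute_codewords_2 := Vorbis.Spec.Worked.compute_codewords_2_ok
      h_compute_codewords_3 := Vorbis.Spec.Worked.compute_codewords_3_ok
      h_compute_codewords_4 := Vorbis.Spec.Worked.compute_codewords_4_ok
      h_compute_codewords_5 := Vorbis.Spec.Worked.compute_codewords_5_ok
      h_compute_codewords_6 := Vorbis.Spec.Worked.compute_codewords_6_ok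
      h_compute_codewords_7 := Vorbis.Spec.Worked.compute_codewords_7_ok
      h_compute_codewords_8 := Vorbis.Spec.Worked.compute_codewords_8_ok
      h_compute_codewords_9 := Vorbis.Spec.Worked.compute_codewords_9_ok
      h_setup_temp_free := Vorbis.Spec.Worked.setup_temp_free_ok
      h_include_in_sort := Vorbis.Spec.Worked.include_in_sort_ok
      h_compute_sorted_huffman_1 := Vorbis.Spec.Worked.compute_sorted_huffman_1_ok
      h_compute_sorted_huffman_2 := Vorbis.Spec.Worked.compute_sorted_huffman_2_ok
      h_compute_sorted_huffman_3 := Vorbis.Spec.Worked.compute_sorted_huffman_3_ok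
      h_compute_sorted_huffman_4 := Vorbis.Spec.Worked.compute_sorted_huffman_4_ok
      h_memcmp := Vorbis.Spec.Worked.memcmp_ok
      h_vorbis_validate := Vorbis.Spec.Worked.vorbis_validate_ok
      h_two_to := Vorbis.Spec.Worked.two_to_ok
      h_ldexp := Vorbis.Spec.Worked.ldexp_ok
      h_float32_unpack := Vorbis.Spec.Worked.float32_unpack_ok
      h_floor := Vorbis.Spec.Worked.floor_ok
      h_exp := Vorbis.Spec.Worked.exp_ok
      h_log := Vorbis.Spec.Worked.log_ok
      h_pow_int := Vorbis.Spec.Worked.pow_int_ok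
      h_pow := Vorbis.Spec.Worked.pow_ok
      h_lookup1_values := Vorbis.Spec.Worked.lookup1_values_ok
      h_compute_bitreverse := Vorbis.Spec.Worked.compute_bitreverse_ok
      h_sin_poly := Vorbis.Spec.Worked.sin_poly_ok
      h_cos_poly := Vorbis.Spec.Worked.cos_poly_ok
      h_sincos_quadrant := Vorbis.Spec.Worked.sincos_quadrant_ok
      h_sin := Vorbis.Spec.Worked.sin_ok
      h_cos := Vorbis.Spec.Worked.cos_ok
      h_compute_twiddle_factors := Vorbis.Spec.Worked.compute_twiddle_factors_ok
      h_square := Vorbis.Spec.Worked.square_ok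
      h_compute_window := Vorbis.Spec.Worked.compute_window_ok
      h_init_blocksize := Vorbis.Spec.Worked.init_blocksize_ok
      h_get32_packet := Vorbis.Spec.Worked.get32_packet_ok
      h_start_decoder_1 := Vorbis.Spec.Worked.start_decoder_1_ok
      h_start_decoder_2a := Vorbis.Spec.Worked.start_decoder_2a_ok
      h_start_decoder_2b := Vorbis.Spec.Worked.start_decoder_2b_ok
      h_start_decoder_2c := Vorbis.Spec.Worked.start_decoder_2c_ok
      h_start_decoder_2d := Vorbis.Spec.Worked.start_decoder_2d_ok
      h_start_decoder_3 := Vorbis.Spec.Worked.start_decoder_3_ok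
      h_start_decoder_4 := Vorbis.Spec.Worked.start_decoder_4_ok
      h_start_decoder_5 := Vorbis.Spec.Worked.start_decoder_5_ok
      h_start_decoder_6 := Vorbis.Spec.Worked.start_decoder_6_ok
      h_start_decoder_7 := Vorbis.Spec.Worked.start_decoder_7_ok
      h_start_decoder_8 := Vorbis.Spec.Worked.start_decoder_8_ok
      h_start_decoder_9a := Vorbis.Spec.Worked.start_decoder_9a_ok
      h_start_decoder_9b := Vorbis.Spec.Worked.start_decoder_9b_ok
      h_start_decoder_9c := Vorbis.Spec.Worked.start_decoder_9c_ok
      h_start_decoder_9d := Vorbis.Spec.Worked.start_decoder_9d_ok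
      h_start_decoder_9e := Vorbis.Spec.Worked.start_decoder_9e_ok
      h_start_decoder_9f := Vorbis.Spec.Worked.start_decoder_9f_ok
      h_start_decoder_ERR := Vorbis.Spec.Worked.start_decoder_ERR_ok
      h_start_decoder_C1 := Vorbis.Spec.Worked.start_decoder_C1_ok
      h_start_decoder_C2a := Vorbis.Spec.Worked.start_decoder_C2a_ok
      h_start_decoder_C2b := Vorbis.Spec.Worked.start_decoder_C2b_ok
      h_start_decoder_C2c := Vorbis.Spec.Worked.start_decoder_C2c_ok
      h_start_decoder_C2d := Vorbis.Spec.Worked.start_decoder_C2d_ok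
      h_start_decoder_C3a := Vorbis.Spec.Worked.start_decoder_C3a_ok
      h_start_decoder_C3b := Vorbis.Spec.Worked.start_decoder_C3b_ok
      h_start_decoder_C3c := Vorbis.Spec.Worked.start_decoder_C3c_ok
      h_start_decoder_C4a := Vorbis.Spec.Worked.start_decoder_C4a_ok
      h_start_decoder_C4b := Vorbis.Spec.Worked.start_decoder_C4b_ok
      h_start_decoder_C4c := Vorbis.Spec.Worked.start_decoder_C4c_ok
      h_start_decoder_C4d := Vorbis.Spec.Worked.start_decoder_C4d_ok
      h_start_decoder_C5a := Vorbis.Spec.Worked.start_decoder_C5a_ok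
      h_start_decoder_C5b := Vorbis.Spec.Worked.start_decoder_C5b_ok
      h_start_decoder_C5c := Vorbis.Spec.Worked.start_decoder_C5c_ok
      h_start_decoder_C5d := Vorbis.Spec.Worked.start_decoder_C5d_ok
      h_start_decoder_C5e := Vorbis.Spec.Worked.start_decoder_C5e_ok
      h_start_decoder_C6a := Vorbis.Spec.Worked.start_decoder_C6a_ok
      h_start_decoder_C6b := Vorbis.Spec.Worked.start_decoder_C6b_ok
      h_start_decoder_C6c := Vorbis.Spec.Worked.start_decoder_C6c_ok
      h_start_decoder_C6d := Vorbis.Spec.Worked.start_decoder_C6d_ok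
      h_start_decoder_C6e := Vorbis.Spec.Worked.start_decoder_C6e_ok
      h_start_decoder_C7a := Vorbis.Spec.Worked.start_decoder_C7a_ok
      h_start_decoder_C7b := Vorbis.Spec.Worked.start_decoder_C7b_ok
      h_start_decoder_C8a := Vorbis.Spec.Worked.start_decoder_C8a_ok
      h_start_decoder_C8b := Vorbis.Spec.Worked.start_decoder_C8b_ok
      h_start_decoder_C8c := Vorbis.Spec.Worked.start_decoder_C8c_ok
      h_start_decoder_C8d := Vorbis.Spec.Worked.start_decoder_C8d_ok
      h_start_decoder_C8e := Vorbis.Spec.Worked.start_decoder_C8e_ok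
      h_start_decoder_C8f := Vorbis.Spec.Worked.start_decoder_C8f_ok
      h_start_decoder_C9a := Vorbis.Spec.Worked.start_decoder_C9a_ok
      h_start_decoder_C9b := Vorbis.Spec.Worked.start_decoder_C9b_ok
      h_start_decoder_C9c := Vorbis.Spec.Worked.start_decoder_C9c_ok
      h_start_decoder_C9d := Vorbis.Spec.Worked.start_decoder_C9d_ok
      h_start_decoder_C10 := Vorbis.Spec.Worked.start_decoder_C10_ok
      h_start_decoder_C11a := Vorbis.Spec.Worked.start_decoder_C11a_ok
      h_start_decoder_C11b := Vorbis.Spec.Worked.start_decoder_C11b_ok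
      h_start_decoder_C11c := Vorbis.Spec.Worked.start_decoder_C11c_ok
      h_start_decoder_C11d := Vorbis.Spec.Worked.start_decoder_C11d_ok
      h_start_decoder_C11e := Vorbis.Spec.Worked.start_decoder_C11e_ok
      h_start_decoder_C11f := Vorbis.Spec.Worked.start_decoder_C11f_ok
      h_start_decoder_C11g := Vorbis.Spec.Worked.start_decoder_C11g_ok
      h_start_decoder_C12 := Vorbis.Spec.Worked.start_decoder_C12_ok
      h_start_decoder_C13a := Vorbis.Spec.Worked.start_decoder_C13a_ok
      h_start_decoder_C13b := Vorbis.Spec.Worked.start_decoder_C13b_ok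
      h_start_decoder_C13c := Vorbis.Spec.Worked.start_decoder_C13c_ok
      h_start_decoder_C13d := Vorbis.Spec.Worked.start_decoder_C13d_ok
      h_start_decoder_C14a := Vorbis.Spec.Worked.start_decoder_C14a_ok
      h_start_decoder_C14b := Vorbis.Spec.Worked.start_decoder_C14b_ok
      h_start_decoder_C14c := Vorbis.Spec.Worked.start_decoder_C14c_ok
      h_start_decoder_C15 := Vorbis.Spec.Worked.start_decoder_C15_ok
      h_start_decoder_C16 := Vorbis.Spec.Worked.start_decoder_C16_ok
      h_start_decoder_F1 := Vorbis.Spec.Worked.start_decoder_F1_ok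
      h_start_decoder_F2a := Vorbis.Spec.Worked.start_decoder_F2a_ok
      h_start_decoder_F2b := Vorbis.Spec.Worked.start_decoder_F2b_ok
      h_start_decoder_F2c := Vorbis.Spec.Worked.start_decoder_F2c_ok
      h_start_decoder_F2d := Vorbis.Spec.Worked.start_decoder_F2d_ok
      h_start_decoder_F3 := Vorbis.Spec.Worked.start_decoder_F3_ok
      h_start_decoder_F4a := Vorbis.Spec.Worked.start_decoder_F4a_ok
      h_start_decoder_F4b := Vorbis.Spec.Worked.start_decoder_F4b_ok
      h_start_decoder_F4c := Vorbis.Spec.Worked.start_decoder_F4c_ok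
      h_start_decoder_F4d := Vorbis.Spec.Worked.start_decoder_F4d_ok
      h_start_decoder_F4e := Vorbis.Spec.Worked.start_decoder_F4e_ok
      h_start_decoder_F5a := Vorbis.Spec.Worked.start_decoder_F5a_ok
      h_start_decoder_F5b := Vorbis.Spec.Worked.start_decoder_F5b_ok
      h_start_decoder_F5c := Vorbis.Spec.Worked.start_decoder_F5c_ok
      h_start_decoder_F5d := Vorbis.Spec.Worked.start_decoder_F5d_ok
      h_start_decoder_F5e := Vorbis.Spec.Worked.start_decoder_F5e_ok
      h_start_decoder_F5f := Vorbis.Spec.Worked.start_decoder_F5f_ok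
      h_start_decoder_F6a := Vorbis.Spec.Worked.start_decoder_F6a_ok
      h_start_decoder_F6b := Vorbis.Spec.Worked.start_decoder_F6b_ok
      h_start_decoder_F6c := Vorbis.Spec.Worked.start_decoder_F6c_ok
      h_start_decoder_F6d := Vorbis.Spec.Worked.start_decoder_F6d_ok
      h_start_decoder_F7 := Vorbis.Spec.Worked.start_decoder_F7_ok
      h_start_decoder_R1a := Vorbis.Spec.Worked.start_decoder_R1a_ok
      h_start_decoder_R1b := Vorbis.Spec.Worked.start_decoder_R1b_ok
      h_start_decoder_R1c := Vorbis.Spec.Worked.start_decoder_R1c_ok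
      h_start_decoder_R1d := Vorbis.Spec.Worked.start_decoder_R1d_ok
      h_start_decoder_R2 := Vorbis.Spec.Worked.start_decoder_R2_ok
      h_start_decoder_R3 := Vorbis.Spec.Worked.start_decoder_R3_ok
      h_start_decoder_R4 := Vorbis.Spec.Worked.start_decoder_R4_ok
      h_start_decoder_R5 := Vorbis.Spec.Worked.start_decoder_R5_ok
      h_start_decoder_R6 := Vorbis.Spec.Worked.start_decoder_R6_ok
      h_start_decoder_R7a := Vorbis.Spec.Worked.start_decoder_R7a_ok
      h_start_decoder_R7b := Vorbis.Spec.Worked.start_decoder_R7b_ok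
      h_start_decoder_R7c := Vorbis.Spec.Worked.start_decoder_R7c_ok
      h_start_decoder_R8 := Vorbis.Spec.Worked.start_decoder_R8_ok
      h_start_decoder_R9 := Vorbis.Spec.Worked.start_decoder_R9_ok
      h_start_decoder_R10 := Vorbis.Spec.Worked.start_decoder_R10_ok
      h_start_decoder_R11 := Vorbis.Spec.Worked.start_decoder_R11_ok
      h_start_decoder_R12a := Vorbis.Spec.Worked.start_decoder_R12a_ok
      h_start_decoder_R12b := Vorbis.Spec.Worked.start_decoder_R12b_ok
      h_start_decoder_R12c := Vorbis.Spec.Worked.start_decoder_R12c_ok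
      h_start_decoder_R12d := Vorbis.Spec.Worked.start_decoder_R12d_ok
      h_start_decoder_R13 := Vorbis.Spec.Worked.start_decoder_R13_ok
      h_start_decoder_R14 := Vorbis.Spec.Worked.start_decoder_R14_ok
      h_start_decoder_R15 := Vorbis.Spec.Worked.start_decoder_R15_ok
      h_start_decoder_R16 := Vorbis.Spec.Worked.start_decoder_R16_ok
      h_start_decoder_R17 := Vorbis.Spec.Worked.start_decoder_R17_ok
      h_start_decoder_R18 := Vorbis.Spec.Worked.start_decoder_R18_ok
      h_start_decoder_R19 := Vorbis.Spec.Worked.start_decoder_R19_ok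
      h_stb_vorbis_open_memory := Vorbis.Spec.Worked.stb_vorbis_open_memory_ok
      h_decode_all_1 := Vorbis.Spec.Worked.decode_all_1_ok
      h_decode_all_2 := Vorbis.Spec.Worked.decode_all_2_ok
      h_decode_all_3 := Vorbis.Spec.Worked.decode_all_3_ok
      h_decode_all_4 := Vorbis.Spec.Worked.decode_all_4_ok
      h_decode_all_5 := Vorbis.Spec.Worked.decode_all_5_ok
      h_decode_all_6 := Vorbis.Spec.Worked.decode_all_6_ok
      h_decode_all_7 := Vorbis.Spec.Worked.decode_all_7_ok
      h_start_vorbis := Vorbis.Spec.Worked.start_vorbis_ok }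

end Vorbis.Spec
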